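-- pv_equiv track=rewrite | github.com/yshishenya/open-webui | backend/open_webui/routers/admin_billing_lead_magnet.py | _normalize_quotas
-- ===== SOURCE A (Python) =====
-- from typing import Dict
--
-- def _normalize_quotas(raw: Dict[str, object]) -> Dict[str, int]:
--     defaults: Dict[str, int] = {
--         "tokens_input": 0,
--         "tokens_output": 0,
--         "images": 0,
--         "tts_seconds": 0,
--         "stt_seconds": 0,
--     }
--     for key, value in raw.items():
--         if key in defaults and isinstance(value, int):
--             defaults[key] = value
--     return defaults
-- ===== SOURCE B (Python) =====
-- from typing import Dict
--
-- def _normalize_quotas(raw: Dict[str, object]) -> Dict[str, int]: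
--     keys = ("tokens_input", "tokens_output", "images", "tts_seconds", "stt_seconds")
--     return {k: raw[k] if k in raw and isinstance(raw[k], int) else 0 for k in keys}
-- ===== Notes on version B (the rewrite author's own statement) =====
-- stated objective: simpler
-- what changed: B drives the loop from the fixed 5-key schema (a dict comprehension over the five literal keys, probing raw) instead of scanning raw.items() and mutating a defaults dict, so the pass is bounded by the schema rather than by len(raw).
import Mathlib
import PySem

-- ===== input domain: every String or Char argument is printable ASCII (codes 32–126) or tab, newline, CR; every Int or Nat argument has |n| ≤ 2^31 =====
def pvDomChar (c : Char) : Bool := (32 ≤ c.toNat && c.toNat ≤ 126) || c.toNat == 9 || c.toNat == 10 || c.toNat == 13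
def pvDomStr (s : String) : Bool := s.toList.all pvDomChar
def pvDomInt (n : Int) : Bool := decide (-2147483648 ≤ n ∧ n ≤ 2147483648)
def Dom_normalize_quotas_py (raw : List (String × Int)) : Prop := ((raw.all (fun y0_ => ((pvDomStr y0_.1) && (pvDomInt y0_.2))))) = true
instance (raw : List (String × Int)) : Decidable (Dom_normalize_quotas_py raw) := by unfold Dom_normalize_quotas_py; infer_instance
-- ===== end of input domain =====

-- B replaces A's scan of raw.items() by a map over the fixed five quota keys probing raw (simpler: schema-driven, no mutated defaults dict).


-- ===== PORT A =====
-- Literal port of A: defaults dict, then 'for key, value in raw.items(): if key in defaults and isinstance(value, int): defaults[key] = value'.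
-- Values are Int by the type convention, so 'isinstance(value, int)' is always true here.
def normalize_quotas_py (raw : List (String × Int)) : List (String × Int) :=
  let defaults : PySem.Dict String Int :=
    PySem.Dict.ofList [("tokens_input", 0), ("tokens_output", 0), ("images", 0),
                       ("tts_seconds", 0), ("stt_seconds", 0)]
  (raw.foldl (fun d p => if d.contains p.1 then d.insert p.1 p.2 else d) defaults).items

-- ===== PORT B =====
-- Literal port of B: {k: raw[k] if k in raw and isinstance(raw[k], int) else 0 for k in keys}
-- ('isinstance' always true under the type convention; 'k in raw' / 'raw[k]' via the input dict).
def normalize_quotas_py_alt (raw : List (String × Int)) : List (String × Int) :=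
  let d : PySem.Dict String Int := PySem.Dict.mk raw
  ["tokens_input", "tokens_output", "images", "tts_seconds", "stt_seconds"].map
    (fun k => (k, if d.contains k then d.getD k 0 else 0))

-- ===== PRECONDITION & SPEC =====
-- Pre_ excludes association lists with duplicate keys: they represent no Python dict (a real dict
-- always has distinct keys, so this excludes no input the Python function can receive); on such
-- lists A's items-scan would keep the last occurrence while B's lookup takes the first.
def Pre_normalize_quotas_py (raw : List (String × Int)) : Prop := (raw.map Prod.fst).Nodup
instance (raw : List (String × Int)) : Decidable (Pre_normalize_quotas_py raw) := by unfold Pre_normalize_quotas_py; infer_instance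

def pvWitness_normalize_quotas_py : (List (String × Int)) := [("images", 7), ("foo", -1), ("tokens_input", 3)]

def Spec_normalize_quotas_py (raw : List (String × Int)) (out : List (String × Int)) : Prop := out = normalize_quotas_py_alt raw
instance (raw : List (String × Int)) (out : List (String × Int)) : Decidable (Spec_normalize_quotas_py raw out) := by unfold Spec_normalize_quotas_py; infer_instance

-- ===== CLAIM (what is proved, stated in full; the proofs are below) =====
def Claim_equal_normalize_quotas_py : Prop := ∀ (raw : List (String × Int)), Dom_normalize_quotas_py raw → Pre_normalize_quotas_py raw → Spec_normalize_quotas_py raw (normalize_quotas_py raw)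

-- ===== LEMMAS AND PROOFS =====

-- A's defaults dict (proof-side name for the literal in the port).
def pvD0 : PySem.Dict String Int :=
  PySem.Dict.ofList [("tokens_input", 0), ("tokens_output", 0), ("images", 0),
                     ("tts_seconds", 0), ("stt_seconds", 0)]

-- A's loop step: overwrite only keys already present.
def pvStep (d : PySem.Dict String Int) (p : String × Int) : PySem.Dict String Int :=
  if d.contains p.1 then d.insert p.1 p.2 else d

theorem pvStep_keys (d : PySem.Dict String Int) (p : String × Int) : (pvStep d p).keys = d.keys := by
  unfold pvStep
  split
  · exact PySem.Dict.keys_insert_of_contains _ _ (by assumption)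
  · rfl

theorem pvFold_keys (raw : List (String × Int)) (d : PySem.Dict String Int) :
    (raw.foldl pvStep d).keys = d.keys := by
  induction raw generalizing d with
  | nil => rfl
  | cons p rest ih => simpa [List.foldl_cons, pvStep_keys] using ih (pvStep d p)

-- Value at k after the fold, for duplicate-free raw: first occurrence in raw if k is present in d, else d's value.
theorem pvFold_getD (raw : List (String × Int)) (hnd : (raw.map Prod.fst).Nodup)
    (d : PySem.Dict String Int) (k : String) :
    (raw.foldl pvStep d).getD k 0 =
      match (PySem.Dict.mk raw).get? k with
      | some v => if d.contains k then v else d.getD k 0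
      | none => d.getD k 0 := by
  induction raw generalizing d with
  | nil => simp [PySem.Dict.get?]
  | cons p rest ih =>
    obtain ⟨k0, v0⟩ := p
    simp only [List.map_cons, List.nodup_cons] at hnd
    rw [List.foldl_cons, ih hnd.2, PySem.Dict.get?_mk_cons]
    by_cases hk : k0 = k
    · subst hk
      have hnone : (PySem.Dict.mk rest).get? k0 = none := by
        rw [PySem.Dict.get?_eq_none_iff_not_mem_keys]
        simpa [PySem.Dict.keys] using hnd.1
      rw [hnone]
      simp only [beq_self_eq_true, if_true]
      unfold pvStep
      by_cases hc : d.contains k0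
      · simp [hc, PySem.Dict.getD_insert_self]
      · simp [hc]
    · have hbeq : (k0 == k) = false := by simpa using hk
      rw [hbeq]
      simp only [Bool.false_eq_true, if_false]
      have hval : (pvStep d (k0, v0)).getD k 0 = d.getD k 0 := by
        unfold pvStep
        split
        · exact PySem.Dict.getD_insert_of_ne _ _ _ (fun h => hk h.symm)
        · rfl
      have hcont : (pvStep d (k0, v0)).contains k = d.contains k := by
        unfold pvStep
        split
        · rw [PySem.Dict.contains_insert]
          simp [beq_eq_false_iff_ne.mpr (fun h => hk h.symm)]
        · rfl
      cases hg : (PySem.Dict.mk rest).get? k <;> simp [hval, hcont]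

theorem normalize_quotas_py_eq_alt (raw : List (String × Int))
    (hnd : (raw.map Prod.fst).Nodup) :
    normalize_quotas_py raw = normalize_quotas_py_alt raw := by
  unfold normalize_quotas_py normalize_quotas_py_alt
  show (raw.foldl pvStep pvD0).items
      = ["tokens_input", "tokens_output", "images", "tts_seconds", "stt_seconds"].map
          (fun k => (k, if (PySem.Dict.mk raw).contains k then (PySem.Dict.mk raw).getD k 0 else 0))
  have hkeys : (raw.foldl pvStep pvD0).keys = pvD0.keys := pvFold_keys raw pvD0
  have hk0 : pvD0.keys = ["tokens_input", "tokens_output", "images", "tts_seconds", "stt_seconds"] := by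
    decide
  have hnodup : (raw.foldl pvStep pvD0).keys.Nodup := by rw [hkeys, hk0]; decide
  rw [PySem.Dict.items_eq_map_keys _ hnodup 0, hkeys, hk0]
  apply List.map_congr_left
  intro k hk
  have hcont : pvD0.contains k = true := by fin_cases hk <;> decide
  have hgd : pvD0.getD k 0 = 0 := by fin_cases hk <;> decide
  rw [pvFold_getD raw hnd pvD0 k]
  cases hg : (PySem.Dict.mk raw).get? k with
  | none =>
    have hc : (PySem.Dict.mk raw).contains k = false := by
      rw [PySem.Dict.contains_eq_isSome_get?, hg]; rfl
    simp [hc, hgd]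
  | some v =>
    have hc : (PySem.Dict.mk raw).contains k = true := by
      rw [PySem.Dict.contains_eq_isSome_get?, hg]; rfl
    have hgdv : (PySem.Dict.mk raw).getD k 0 = v := PySem.Dict.getD_of_get?_eq_some _ _ hg
    simp [hcont, hc, hgdv]

-- ===== VERDICT (by name: the statement is the Claim_ definition above) =====
theorem normalize_quotas_py_spec : Claim_equal_normalize_quotas_py := by
  intro raw _ hpre
  unfold Spec_normalize_quotas_py
  exact normalize_quotas_py_eq_alt raw hpre
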